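-- pv_equiv track=rewrite | github.com/Rin204/Library-Python | expansion/math/Quotients.py | Quotients
-- ===== SOURCE A (Python) =====
-- def Quotients(n):
--     """
--     return [(x_i, l_i, r_i), ...]
--     s.t. (n / i) == x \\forall i \\in [l, r), x_i < x_{i+1}
--     """
--
--     ret = []
--     l = 1
--     while l <= n:
--         p = n // l
--         r = n // p + 1
--         ret.append((p, l, r))
--         l = r
--     return ret[::-1]
-- ===== SOURCE B (Python) =====
-- def Quotients(n):
--     """
--     return [(x_i, l_i, r_i), ...]
--     s.t. (n / i) == x \forall i \in [l, r), x_i < x_{i+1}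
--     """
--     if n <= 0:
--         return []
--     s = 1
--     while (s + 1) * (s + 1) <= n:
--         s += 1
--     # small quotient values 1..s, ascending, each with its full index block
--     ret = [(x, n // (x + 1) + 1, n // x + 1) for x in range(1, s + 1)]
--     # large quotient values n//i > s: each index i <= s is its own singleton block
--     for i in range(s, 0, -1):
--         if n // i > s:
--             ret.append((n // i, i, i + 1))
--     return ret
-- ===== Notes on version B (the rewrite author's own statement) =====
-- stated objective: alternative
-- what changed: B splits the enumeration at s = isqrt(n), computed by a squaring loop: an ascending pass emits each small-quotient block (x, n//(x+1)+1, n//x+1) for x up to s, then a countdown pass appends the large-quotient singleton blocks (n//i, i, i+1) for indices i at most s with n//i > s, so the list is built already in ascending order; A instead jump-iterates a single left-pointer while loop and reverses at the end.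
import Mathlib
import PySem

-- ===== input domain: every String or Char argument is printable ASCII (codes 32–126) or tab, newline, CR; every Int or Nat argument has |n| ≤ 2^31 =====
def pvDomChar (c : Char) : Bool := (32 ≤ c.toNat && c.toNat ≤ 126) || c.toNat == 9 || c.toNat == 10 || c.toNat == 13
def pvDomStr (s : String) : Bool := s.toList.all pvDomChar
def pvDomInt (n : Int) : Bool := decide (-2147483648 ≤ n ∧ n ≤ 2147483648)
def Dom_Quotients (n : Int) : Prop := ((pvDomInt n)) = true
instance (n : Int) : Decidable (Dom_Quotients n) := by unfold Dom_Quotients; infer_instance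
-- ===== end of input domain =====

-- B enumerates the quotient blocks of n split at s = isqrt(n) in two passes (small quotients
-- ascending, then the singleton blocks of the large quotients), instead of A's single
-- pointer-jumping while loop followed by a reversal; same cost, alternative decomposition.

-- ===== PORT A =====
-- while l <= n: p = n//l; r = n//p+1; ret.append((p,l,r)); l = r
-- (fuel-counted recursion; fuel n.toNat suffices since l strictly increases and stays ≤ n+1)
def QuotientsLoop (n : Int) : Nat → Int → List (Int × Int × Int) → List (Int × Int × Int)
  | 0, _, ret => ret
  | fuel + 1, l, ret =>
    if l ≤ n then
      let p := PySem.Int.floordiv n l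
      let r := PySem.Int.floordiv n p + 1
      QuotientsLoop n fuel r (ret ++ [(p, l, r)])
    else ret

def Quotients (n : Int) : List (Int × Int × Int) :=
  -- ret[::-1] is List.reverse (PySem.List.slice?_none_none_neg_one)
  (QuotientsLoop n n.toNat 1 []).reverse

-- ===== PORT B =====
-- s = 1; while (s+1)*(s+1) <= n: s += 1
def pyIsqrtLoop (n s : Int) : Int :=
  if (s + 1) * (s + 1) ≤ n then pyIsqrtLoop n (s + 1) else s
termination_by (n - s).toNat
decreasing_by
  have hns : s < n := by nlinarith
  omega

def Quotients_alt (n : Int) : List (Int × Int × Int) :=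
  if n ≤ 0 then []
  else
    let s := pyIsqrtLoop n 1
    let ret := (PySem.List.pyRange 1 (s + 1) 1).map
      (fun x => (x, PySem.Int.floordiv n (x + 1) + 1, PySem.Int.floordiv n x + 1))
    (PySem.List.pyRange s 0 (-1)).foldl
      (fun ret i =>
        if s < PySem.Int.floordiv n i then ret ++ [(PySem.Int.floordiv n i, i, i + 1)] else ret)
      ret

-- ===== PRECONDITION & SPEC =====
def Spec_Quotients (n : Int) (out : List (Int × Int × Int)) : Prop := out = Quotients_alt n
instance (n : Int) (out : List (Int × Int × Int)) : Decidable (Spec_Quotients n out) := by unfold Spec_Quotients; infer_instance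

-- ===== CLAIM (what is proved, stated in full; the proofs are below) =====
def Claim_equal_Quotients : Prop := ∀ (n : Int), Dom_Quotients n → Spec_Quotients n (Quotients n)

-- ===== LEMMAS AND PROOFS =====

-- bracket facts for q = n // x (0 < x)
theorem pvFloordiv_bracket (n x : Int) (hx : 0 < x) :
    PySem.Int.floordiv n x * x ≤ n ∧ n < (PySem.Int.floordiv n x + 1) * x :=
  ⟨(PySem.Int.le_floordiv_iff_mul_le hx).mp le_rfl,
   (PySem.Int.floordiv_lt_iff_lt_mul hx).mp (lt_add_one _)⟩

-- n//(x+1) < n//x whenever 1 ≤ x and x*x ≤ n (so every value ≤ isqrt n is attained)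
theorem pvAtt (n x : Int) (hx : 1 ≤ x) (hxx : x * x ≤ n) :
    PySem.Int.floordiv n (x + 1) < PySem.Int.floordiv n x := by
  have hq : x ≤ PySem.Int.floordiv n x := (PySem.Int.le_floordiv_iff_mul_le (by omega)).mpr hxx
  have hb := pvFloordiv_bracket n x (by omega)
  refine (PySem.Int.floordiv_lt_iff_lt_mul (b := x + 1) (by omega)).mpr ?_
  nlinarith [hb.2]

-- value at the left endpoint of the block of x : n // (n//(x+1) + 1) = x
theorem pvLeftVal (n x : Int) (hx : 1 ≤ x) (hxx : x * x ≤ n) :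
    PySem.Int.floordiv n (PySem.Int.floordiv n (x + 1) + 1) = x := by
  have hnn : (0:Int) ≤ n := by nlinarith
  have h0 : 0 ≤ PySem.Int.floordiv n (x + 1) :=
    (PySem.Int.le_floordiv_iff_mul_le (by omega)).mpr (by omega)
  have hatt := pvAtt n x hx hxx
  have hbx := pvFloordiv_bracket n x (by omega)
  have hbx1 := pvFloordiv_bracket n (x + 1) (by omega)
  refine (PySem.Int.floordiv_eq_iff_of_pos (by omega)).mpr ⟨?_, ?_⟩
  · nlinarith [hbx.1]
  · nlinarith [hbx1.2]

-- phase-1 blocks are singletons: n // (n // l) = l for 1 ≤ l with l*(s+1) ≤ n, s = isqrt n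
theorem pvSingleton (n s l : Int) (hl : 1 ≤ l) (hs : 1 ≤ s) (hsn : n < (s + 1) * (s + 1))
    (hls : l * (s + 1) ≤ n) :
    PySem.Int.floordiv n (PySem.Int.floordiv n l) = l := by
  have hx : s + 1 ≤ PySem.Int.floordiv n l :=
    (PySem.Int.le_floordiv_iff_mul_le hl).mpr (by nlinarith)
  have hbl := pvFloordiv_bracket n l (by omega)
  have hge : l ≤ PySem.Int.floordiv n (PySem.Int.floordiv n l) :=
    (PySem.Int.le_floordiv_iff_mul_le (by omega)).mpr (by nlinarith [hbl.1])
  have hls2 : l ≤ s := by nlinarith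
  have hlt : PySem.Int.floordiv n (PySem.Int.floordiv n l) < l + 1 := by
    by_contra hcon
    rw [not_lt] at hcon
    have h1 : (l + 1) * PySem.Int.floordiv n l ≤ n :=
      (PySem.Int.le_floordiv_iff_mul_le (by omega)).mp hcon
    have h2 : PySem.Int.floordiv n l ≤ PySem.Int.floordiv n (l + 1) :=
      (PySem.Int.le_floordiv_iff_mul_le (by omega)).mpr (by nlinarith)
    have h3 := pvAtt n l hl (by nlinarith)
    omega
  omega

theorem pvIsqrtLoop_spec (n : Int) :
    ∀ s : Int, 1 ≤ s → s * s ≤ n →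
      1 ≤ pyIsqrtLoop n s ∧ pyIsqrtLoop n s * pyIsqrtLoop n s ≤ n ∧
        n < (pyIsqrtLoop n s + 1) * (pyIsqrtLoop n s + 1) := by
  intro s
  induction s using pyIsqrtLoop.induct n with
  | case1 s h ih =>
    intro hs _
    rw [pyIsqrtLoop, if_pos h]
    exact ih (by omega) h
  | case2 s h =>
    intro hs hss
    rw [pyIsqrtLoop, if_neg h]
    rw [not_le] at h
    exact ⟨hs, hss, h⟩

-- phase 2 of A's loop: from l = n//(x+1)+1 with x ≤ isqrt n it emits the blocks of x, x-1, …, 1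
theorem pvPhase2 (n s : Int) (hn : 1 ≤ n) (hs : 1 ≤ s) (hss : s * s ≤ n) :
    ∀ (k fuel : Nat) (ret : List (Int × Int × Int)), (k : Int) ≤ s →
      (n - PySem.Int.floordiv n ((k : Int) + 1)).toNat ≤ fuel →
      QuotientsLoop n fuel (PySem.Int.floordiv n ((k : Int) + 1) + 1) ret =
        ret ++ ((PySem.List.pyRange 1 ((k : Int) + 1) 1).map
          (fun x => (x, PySem.Int.floordiv n (x + 1) + 1, PySem.Int.floordiv n x + 1))).reverse := by
  intro k
  induction k with
  | zero =>
    intro fuel ret _ _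
    simp only [Nat.cast_zero]
    have h1 : PySem.Int.floordiv n ((0 : Int) + 1) = n := by
      refine (PySem.Int.floordiv_eq_iff_of_pos (by omega)).mpr (by constructor <;> omega)
    rw [h1]
    cases fuel with
    | zero => simp [QuotientsLoop]
    | succ m =>
      rw [QuotientsLoop, if_neg (by omega)]
      simp
  | succ k ih =>
    intro fuel ret hk hfuel
    push_cast at hk hfuel ⊢
    have hx1 : (1 : Int) ≤ (k : Int) + 1 := by omega
    have hxx : ((k : Int) + 1) * ((k : Int) + 1) ≤ n := by nlinarith
    have hval := pvLeftVal n ((k : Int) + 1) hx1 hxx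
    have hatt := pvAtt n ((k : Int) + 1) hx1 hxx
    have hb := pvFloordiv_bracket n ((k : Int) + 1 + 1) (by omega)
    have h0 : 0 ≤ PySem.Int.floordiv n ((k : Int) + 1 + 1) :=
      (PySem.Int.le_floordiv_iff_mul_le (by omega)).mpr (by nlinarith)
    -- the start index is ≤ n, so the loop takes a step and fuel is positive
    have hlen : PySem.Int.floordiv n ((k : Int) + 1 + 1) + 1 ≤ n := by
      have : PySem.Int.floordiv n ((k : Int) + 1 + 1) < n :=
        (PySem.Int.floordiv_lt_iff_lt_mul (by omega)).mpr (by nlinarith)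
      omega
    cases fuel with
    | zero => omega
    | succ m =>
      rw [QuotientsLoop, if_pos hlen]
      simp only [hval]
      have hnext := ih m (ret ++ [((k : Int) + 1,
          PySem.Int.floordiv n ((k : Int) + 1 + 1) + 1, PySem.Int.floordiv n ((k : Int) + 1) + 1)])
        (by omega) (by omega)
      rw [hnext]
      rw [PySem.List.pyRange_one_succ_right (by omega : (1:Int) ≤ (k : Int) + 1)]
      simp

-- phase 1 of A's loop: while n//l > isqrt n every block is the singleton {l}
theorem pvPhase1 (n s : Int) (hn : 1 ≤ n) (hs : 1 ≤ s) (hss : s * s ≤ n)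
    (hsn : n < (s + 1) * (s + 1)) :
    ∀ (d : Nat) (fuel : Nat) (ret : List (Int × Int × Int)) (l : Int),
      l = PySem.Int.floordiv n (s + 1) + 1 - (d : Int) → 1 ≤ l →
      (n + 1 - l).toNat ≤ fuel →
      QuotientsLoop n fuel l ret =
        ret ++ (PySem.List.pyRange l (PySem.Int.floordiv n (s + 1) + 1) 1).map
            (fun i => (PySem.Int.floordiv n i, i, i + 1)) ++
          ((PySem.List.pyRange 1 (s + 1) 1).map
            (fun x => (x, PySem.Int.floordiv n (x + 1) + 1, PySem.Int.floordiv n x + 1))).reverse := by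
  intro d
  induction d with
  | zero =>
    intro fuel ret l hl _ hfuel
    have hseq : ((s.toNat : Int)) = s := by omega
    have hdt : (0:Int) ≤ PySem.Int.floordiv n (s + 1) :=
      (PySem.Int.le_floordiv_iff_mul_le (by omega)).mpr (by nlinarith)
    simp only [Nat.cast_zero, sub_zero] at hl
    subst hl
    have hf2 : (n - PySem.Int.floordiv n (((s.toNat : Int)) + 1)).toNat ≤ fuel := by
      rw [hseq]; omega
    have h2 := pvPhase2 n s hn hs hss s.toNat fuel ret (by omega) hf2
    rw [hseq] at h2
    rw [h2]
    rw [PySem.List.pyRange_one_eq_nil (le_refl (PySem.Int.floordiv n (s + 1) + 1))]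
    simp
  | succ d ih =>
    intro fuel ret l hl hl1 hfuel
    have hdt : (0:Int) ≤ PySem.Int.floordiv n (s + 1) :=
      (PySem.Int.le_floordiv_iff_mul_le (by omega)).mpr (by nlinarith)
    have hlt : l ≤ PySem.Int.floordiv n (s + 1) := by push_cast at hl; omega
    have hls : l * (s + 1) ≤ n := (PySem.Int.le_floordiv_iff_mul_le (by omega)).mp hlt
    have hln : l ≤ n := by nlinarith
    have hsing := pvSingleton n s l hl1 hs hsn hls
    cases fuel with
    | zero => omega
    | succ m =>
      rw [QuotientsLoop, if_pos hln]
      simp only [hsing]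
      have hnext := ih m (ret ++ [(PySem.Int.floordiv n l, l, l + 1)]) (l + 1)
        (by push_cast at hl ⊢; omega) (by omega) (by omega)
      rw [hnext]
      rw [PySem.List.pyRange_one_cons (by omega : l < PySem.Int.floordiv n (s + 1) + 1)]
      simp

theorem pvMain (n : Int) (hn : 1 ≤ n) : Quotients n = Quotients_alt n := by
  obtain ⟨hs1, hss, hsn⟩ := pvIsqrtLoop_spec n 1 le_rfl (by nlinarith)
  set s := pyIsqrtLoop n 1 with hsdef
  have hdt : (0:Int) ≤ PySem.Int.floordiv n (s + 1) :=
    (PySem.Int.le_floordiv_iff_mul_le (by omega)).mpr (by nlinarith)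
  have hts : PySem.Int.floordiv n (s + 1) < s + 1 :=
    (PySem.Int.floordiv_lt_iff_lt_mul (by omega)).mpr (by nlinarith)
  -- A's loop unrolled into the two phases
  have hA := pvPhase1 n s hn hs1 hss hsn (PySem.Int.floordiv n (s + 1)).toNat n.toNat [] 1
    (by omega) le_rfl (by omega)
  -- B's trailing loop as filter-map
  have hB := PySem.List.foldl_append_if (fun i => decide (s < PySem.Int.floordiv n i))
    (fun i => (PySem.Int.floordiv n i, i, i + 1)) (PySem.List.pyRange s 0 (-1))
    ((PySem.List.pyRange 1 (s + 1) 1).map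
      (fun x => (x, PySem.Int.floordiv n (x + 1) + 1, PySem.Int.floordiv n x + 1)))
  -- the filtered countdown range is exactly the reversed range 1..n//(s+1)
  have hfilter : (PySem.List.pyRange 1 (s + 1) 1).filter
      (fun i => decide (s < PySem.Int.floordiv n i)) =
      PySem.List.pyRange 1 (PySem.Int.floordiv n (s + 1) + 1) 1 := by
    rw [PySem.List.pyRange_one_append 1 (PySem.Int.floordiv n (s + 1) + 1) (s + 1)
      (by omega) (by omega), List.filter_append]
    have h1 : (PySem.List.pyRange 1 (PySem.Int.floordiv n (s + 1) + 1) 1).filter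
        (fun i => decide (s < PySem.Int.floordiv n i)) =
        PySem.List.pyRange 1 (PySem.Int.floordiv n (s + 1) + 1) 1 := by
      apply List.filter_eq_self.mpr
      intro i hi
      rw [PySem.List.mem_pyRange_one] at hi
      have hisn : i * (s + 1) ≤ n :=
        (PySem.Int.le_floordiv_iff_mul_le (b := s + 1) (by omega)).mp (by omega)
      simp only [decide_eq_true_eq]
      have : s + 1 ≤ PySem.Int.floordiv n i :=
        (PySem.Int.le_floordiv_iff_mul_le (by omega)).mpr (by nlinarith)
      omega
    have h2 : (PySem.List.pyRange (PySem.Int.floordiv n (s + 1) + 1) (s + 1) 1).filter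
        (fun i => decide (s < PySem.Int.floordiv n i)) = [] := by
      apply List.filter_eq_nil_iff.mpr
      intro i hi
      rw [PySem.List.mem_pyRange_one] at hi
      have hni : n < i * (s + 1) :=
        (PySem.Int.floordiv_lt_iff_lt_mul (by omega)).mp (by omega)
      simp only [decide_eq_true_eq, not_lt]
      have : PySem.Int.floordiv n i < s + 1 :=
        (PySem.Int.floordiv_lt_iff_lt_mul (by omega)).mpr (by nlinarith)
      omega
    rw [h1, h2, List.append_nil]
  simp only [decide_eq_true_eq] at hB
  unfold Quotients Quotients_alt
  rw [if_neg (by omega), hA, hB]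
  rw [PySem.List.pyRange_neg_one_eq_reverse, zero_add, List.filter_reverse, hfilter]
  simp [List.reverse_append]

-- ===== VERDICT (by name: the statement is the Claim_ definition above) =====
theorem Quotients_spec : Claim_equal_Quotients := by
  intro n _
  unfold Spec_Quotients
  by_cases hn : n ≤ 0
  · have h1 : Quotients n = [] := by
      unfold Quotients
      have : n.toNat = 0 := by omega
      rw [this]
      simp [QuotientsLoop]
    rw [h1, Quotients_alt, if_pos hn]
  · exact pvMain n (by omega)
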